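-- pv_equiv track=rewrite | github.com/TylerKienVu/inf141project3 | createIndex.py | _createAppendDict
-- ===== SOURCE A (Python) =====
-- def _createAppendDict(tokenList, docId):
--     """
--     Creates the dict that will contain the information for each token. The function will return
--     a dict with key=token, value=(documentId,numberOfTimesTokenAppears).
--     """
--     appendDict = dict()
--     for token in tokenList:
--         if token not in appendDict:
--             appendDict[token] = (docId,1)
--         else:
--             appendDict[token] = (docId,appendDict[token][1]+1)
--     return appendDict
-- ===== SOURCE B (Python) =====
-- def _createAppendDict(tokenList, docId):
--     """Dedup-then-count: iterate each distinct token (first-appearance order)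
--     and count its occurrences with a full scan of tokenList."""
--     return {token: (docId, tokenList.count(token)) for token in dict.fromkeys(tokenList)}
-- ===== Notes on version B (the rewrite author's own statement) =====
-- stated objective: alternative
-- what changed: Instead of A's single pass that maintains a dict and increments a running count per token, B first deduplicates the tokens (dict.fromkeys, first-appearance order) and then, for each distinct token, counts its occurrences with a separate full scan via list.count.
import Mathlib
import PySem

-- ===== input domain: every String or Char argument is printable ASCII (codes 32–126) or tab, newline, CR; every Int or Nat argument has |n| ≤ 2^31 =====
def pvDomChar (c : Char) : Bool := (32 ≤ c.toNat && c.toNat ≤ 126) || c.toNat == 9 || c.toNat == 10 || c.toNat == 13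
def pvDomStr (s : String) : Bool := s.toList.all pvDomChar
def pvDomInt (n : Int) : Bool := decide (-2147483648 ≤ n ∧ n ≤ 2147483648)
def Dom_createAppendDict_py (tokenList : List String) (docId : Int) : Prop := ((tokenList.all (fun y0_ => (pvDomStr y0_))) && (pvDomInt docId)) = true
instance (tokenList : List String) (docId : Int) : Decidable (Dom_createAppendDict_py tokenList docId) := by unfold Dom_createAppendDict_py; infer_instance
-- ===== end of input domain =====

-- B replaces A's single counting pass (dict with a running count per token) by dedup-then-count: map each distinct token (first-appearance order) to a full-scan count; alternative decomposition, not faster.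


-- ===== PORT A =====
-- Literal port of A: one pass, branching on membership, overwriting the (docId, count) pair.
def createAppendDict_py (tokenList : List String) (docId : Int) : List (String × Int × Int) :=
  (tokenList.foldl (fun appendDict token =>
      if appendDict.contains token = false then
        appendDict.insert token (docId, 1)
      else
        appendDict.insert token (docId, (appendDict.getD token (0, 0)).2 + 1))
    (PySem.Dict.empty : PySem.Dict String (Int × Int))).items

-- ===== PORT B =====
-- Port of B: dict.fromkeys = PySem.List.dedup; each distinct token mapped to (docId, tokenList.count token).
def createAppendDict_py_alt (tokenList : List String) (docId : Int) : List (String × Int × Int) :=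
  (PySem.List.dedup tokenList).map (fun token => (token, (docId, (PySem.List.count tokenList token : Int))))

-- ===== PRECONDITION & SPEC =====
def Spec_createAppendDict_py (tokenList : List String) (docId : Int) (out : List (String × Int × Int)) : Prop := out = createAppendDict_py_alt tokenList docId
instance (tokenList : List String) (docId : Int) (out : List (String × Int × Int)) : Decidable (Spec_createAppendDict_py tokenList docId out) := by unfold Spec_createAppendDict_py; infer_instance

-- ===== CLAIM (what is proved, stated in full; the proofs are below) =====
def Claim_equal_createAppendDict_py : Prop := ∀ (tokenList : List String) (docId : Int), Dom_createAppendDict_py tokenList docId → Spec_createAppendDict_py tokenList docId (createAppendDict_py tokenList docId)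

-- ===== LEMMAS AND PROOFS =====

-- A's loop body always inserts at `token`; written as one insert so the foldl-insert library lemmas apply.
theorem stepA_eq_insert (docId : Int) (d : PySem.Dict String (Int × Int)) (t : String) :
    (if d.contains t = false then d.insert t (docId, 1)
     else d.insert t (docId, (d.getD t (0, 0)).2 + 1))
      = d.insert t (if d.contains t = false then (docId, 1) else (docId, (d.getD t (0, 0)).2 + 1)) := by
  by_cases h : d.contains t = false <;> simp [h]

-- A's dict, rewritten in the `insert x (f d x)` shape.
def foldA (docId : Int) (l : List String) : PySem.Dict String (Int × Int) :=
  l.foldl (fun d t => d.insert t (if d.contains t = false then (docId, 1)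
                                  else (docId, (d.getD t (0, 0)).2 + 1)))
    PySem.Dict.empty

theorem createAppendDict_py_eq_foldA (tokenList : List String) (docId : Int) :
    createAppendDict_py tokenList docId = (foldA docId tokenList).items := by
  unfold createAppendDict_py foldA
  have hfun : (fun (d : PySem.Dict String (Int × Int)) (t : String) =>
      if d.contains t = false then d.insert t (docId, 1)
      else d.insert t (docId, (d.getD t (0, 0)).2 + 1))
      = fun d t => d.insert t (if d.contains t = false then (docId, 1)
                               else (docId, (d.getD t (0, 0)).2 + 1)) := by
    funext d t
    exact stepA_eq_insert docId d t
  rw [hfun]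

theorem keys_foldA (docId : Int) (l : List String) :
    (foldA docId l).keys = PySem.List.dedup l := by
  unfold foldA
  rw [PySem.Dict.keys_foldl_insert, PySem.List.dedup_eq_ofList, PySem.Set.ofList_eq_foldl]
  rfl

theorem contains_foldA (docId : Int) (l : List String) (t : String) :
    (foldA docId l).contains t = decide (t ∈ l) := by
  rcases h : (foldA docId l).contains t with _ | _
  · symm
    simp only [decide_eq_false_iff_not]
    intro hm
    have : (foldA docId l).contains t = true := by
      rw [PySem.Dict.contains_iff_mem_keys, keys_foldA, PySem.List.dedup_eq_ofList,
        PySem.Set.mem_ofList]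
      exact hm
    simp [this] at h
  · symm
    rw [PySem.Dict.contains_iff_mem_keys, keys_foldA, PySem.List.dedup_eq_ofList,
      PySem.Set.mem_ofList] at h
    simp [h]

-- loop characterisation: every token present in the prefix is mapped to (docId, its count so far)
theorem getD_foldA (docId : Int) (l : List String) (k : String) (hk : k ∈ l) :
    (foldA docId l).getD k (0, 0) = (docId, (PySem.List.count l k : Int)) := by
  induction l using List.reverseRecOn with
  | nil => cases hk
  | append_singleton l t ih =>
    have hstep : foldA docId (l ++ [t])
        = (foldA docId l).insert t (if (foldA docId l).contains t = false then (docId, 1)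
            else (docId, ((foldA docId l).getD t (0, 0)).2 + 1)) := by
      unfold foldA
      rw [List.foldl_append, List.foldl_cons, List.foldl_nil]
    rw [hstep, PySem.Dict.getD_insert]
    by_cases hkt : k = t
    · subst hkt
      rcases hm : decide (k ∈ l) with _ | _
      · have hnm : ¬ k ∈ l := of_decide_eq_false hm
        rw [if_pos rfl, if_pos (by rw [contains_foldA, hm])]
        simp [PySem.List.count, List.count_append, List.count_eq_zero.mpr hnm]
      · have hmem : k ∈ l := of_decide_eq_true hm
        rw [if_pos rfl, if_neg (by rw [contains_foldA, hm]; simp), ih hmem]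
        simp [PySem.List.count, List.count_append]
    · have hkl : k ∈ l := by
        rcases List.mem_append.mp hk with h | h
        · exact h
        · simp at h; exact absurd h hkt
      rw [if_neg hkt, ih hkl]
      simp [PySem.List.count, List.count_append, Ne.symm hkt]

-- ===== VERDICT (by name: the statement is the Claim_ definition above) =====
theorem createAppendDict_py_spec : Claim_equal_createAppendDict_py := by
  intro tokenList docId _
  unfold Spec_createAppendDict_py createAppendDict_py_alt
  rw [createAppendDict_py_eq_foldA]
  have hnd : (foldA docId tokenList).keys.Nodup := by
    unfold foldA
    exact PySem.Dict.nodup_keys_foldl_insert _ _ _ PySem.Dict.nodup_keys_empty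
  rw [PySem.Dict.items_eq_map_keys _ hnd (0, 0), keys_foldA]
  apply List.map_congr_left
  intro k hk
  rw [getD_foldA docId tokenList k]
  rw [PySem.List.dedup_eq_ofList, PySem.Set.mem_ofList] at hk
  exact hk
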